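-- pv_equiv track=rewrite | github.com/gabriellaec/desoft-analise-exercicios | backup/user_154/ch9_2019_03_29_13_19_35_577294.py | lista_sufixos
-- ===== SOURCE A (Python) =====
-- def lista_sufixos(string):
--     lista = []
--
--     string = string.replace(" ", "")
--
--     i = len(string);
--
--     while i > 0:
--         lista.append(string[:i])
--         i = i - 1
--
--     return lista
-- ===== SOURCE B (Python) =====
-- def lista_sufixos(string):
--     string = string.replace(" ", "")
--     prefix = ''
--     out = []
--     for ch in string:
--         prefix += ch
--         out.append(prefix)
--     return out[::-1]
-- ===== Notes on version B (the rewrite author's own statement) =====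
-- stated objective: alternative
-- what changed: B maintains a running prefix accumulator while scanning forward over the space-free string (appending each extended prefix) and reverses the built list, instead of A's backward index loop that recomputes each prefix via an independent slice string[:i].
import Mathlib
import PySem

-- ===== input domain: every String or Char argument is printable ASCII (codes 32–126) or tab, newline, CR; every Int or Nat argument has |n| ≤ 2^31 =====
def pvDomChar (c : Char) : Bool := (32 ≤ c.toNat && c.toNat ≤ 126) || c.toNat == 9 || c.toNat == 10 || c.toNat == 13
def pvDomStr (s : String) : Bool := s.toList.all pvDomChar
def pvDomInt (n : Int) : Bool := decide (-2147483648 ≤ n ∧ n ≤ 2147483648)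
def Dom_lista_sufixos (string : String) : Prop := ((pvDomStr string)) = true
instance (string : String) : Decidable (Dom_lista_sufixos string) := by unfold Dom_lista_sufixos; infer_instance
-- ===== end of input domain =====

-- B replaces A's backward index loop over slices string[:i] by a forward scan with a
-- running prefix accumulator, reversing the built list at the end (objective: alternative).

-- ===== PORT A =====
-- while i > 0: lista.append(string[:i]); i = i - 1   (i counts down; structural recursion on i)
def pvLoopA (cs : List Char) : Nat → List String → List String
  | 0, acc => acc
  | i + 1, acc =>
      pvLoopA cs i (acc ++ [String.ofList (PySem.List.slice cs none (some ((i : Int) + 1)))])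

def lista_sufixos (string : String) : List String :=
  let cs := (PySem.Str.replace string " " "").toList
  pvLoopA cs cs.length []

-- ===== PORT B =====
-- for ch in string: prefix += ch; out.append(prefix);  return out[::-1]
def lista_sufixos_alt (string : String) : List String :=
  let cs := (PySem.Str.replace string " " "").toList
  let st := cs.foldl (fun (s : List Char × List String) ch =>
      (s.1 ++ [ch], s.2 ++ [String.ofList (s.1 ++ [ch])])) (([] : List Char), ([] : List String))
  st.2.reverse

-- ===== PRECONDITION & SPEC =====
def Spec_lista_sufixos (string : String) (out : List String) : Prop := out = lista_sufixos_alt string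
instance (string : String) (out : List String) : Decidable (Spec_lista_sufixos string out) := by unfold Spec_lista_sufixos; infer_instance

-- ===== CLAIM (what is proved, stated in full; the proofs are below) =====
def Claim_equal_lista_sufixos : Prop := ∀ (string : String), Dom_lista_sufixos string → Spec_lista_sufixos string (lista_sufixos string)

-- ===== LEMMAS AND PROOFS =====

-- A's loop appends cs[:i], cs[:i-1], …, cs[:1]: the reverse of the increasing prefix list.
theorem pvLoopA_eq (cs : List Char) (n : Nat) (acc : List String) :
    pvLoopA cs n acc =
      acc ++ ((List.range n).map (fun k => String.ofList (cs.take (k + 1)))).reverse := by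
  induction n generalizing acc with
  | zero => simp [pvLoopA]
  | succ i ih =>
      simp only [pvLoopA, ih, List.range_succ, List.map_append, List.reverse_append]
      rw [show ((i : Int) + 1) = ((i + 1 : Nat) : Int) by push_cast; ring,
        PySem.List.slice_to_natCast]
      simp

-- B's fold carries (prefix so far, prefixes collected so far).
theorem pvFoldB_eq (cs pre : List Char) (out : List String) :
    cs.foldl (fun (s : List Char × List String) ch =>
        (s.1 ++ [ch], s.2 ++ [String.ofList (s.1 ++ [ch])])) (pre, out) =
      (pre ++ cs, out ++ (List.range cs.length).map (fun k => String.ofList (pre ++ cs.take (k + 1)))) := by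
  induction cs generalizing pre out with
  | nil => simp
  | cons c rest ih =>
      simp only [List.foldl_cons, ih, List.length_cons, List.range_succ_eq_map,
        List.map_cons, List.map_map]
      simp [Prod.ext_iff, Function.comp, List.take_succ_cons, List.append_assoc]

-- ===== VERDICT (by name: the statement is the Claim_ definition above) =====
theorem lista_sufixos_spec : Claim_equal_lista_sufixos := by
  intro s _
  unfold Spec_lista_sufixos lista_sufixos lista_sufixos_alt
  simp only [pvLoopA_eq, pvFoldB_eq]
  simp
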